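-- pv_equiv track=rewrite | github.com/uvsq22009244/exercice | correction_exo3.py | etape_parallele
-- ===== SOURCE A (Python) =====
-- import copy as cp
--
-- def etape_parallele(tab):
--     """Fait une étape de l'automate parallèle"""
--     cont = False
--     tab_res = cp.deepcopy(tab)
--     n = len(tab)
--     for i in range(1, n-1):
--         for j in range(1, n-1):
--             if tab[i][j] >= 4:
--                 cont = True
--                 tab_res[i][j] -= 4
--                 tab_res[i+1][j] += 1
--                 tab_res[i-1][j] += 1
--                 tab_res[i][j+1] += 1
--                 tab_res[i][j-1] += 1
--     return tab_res, cont
-- ===== SOURCE B (Python) =====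
-- def etape_parallele(tab):
--     """Fait une étape de l'automate parallèle (gather formulation)."""
--     n = len(tab)
--
--     def t(i, j):
--         return 1 if 1 <= i <= n - 2 and 1 <= j <= n - 2 and tab[i][j] >= 4 else 0
--
--     tab_res = [[tab[i][j] - 4 * t(i, j)
--                 + t(i - 1, j) + t(i + 1, j) + t(i, j - 1) + t(i, j + 1)
--                 for j in range(len(tab[i]))]
--                for i in range(n)]
--     cont = any(t(i, j) == 1 for i in range(1, n - 1) for j in range(1, n - 1))
--     return tab_res, cont
-- ===== Notes on version B (the rewrite author's own statement) =====
-- stated objective: alternative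
-- what changed: Replaces A's scatter (deepcopy then in-place +=/-= updates around each toppling cell) by a pure gather: a toppling predicate t(i,j) and one comprehension computing each output cell from its own and its four neighbours' predicate values, with cont an any() over the interior.
import Mathlib
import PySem

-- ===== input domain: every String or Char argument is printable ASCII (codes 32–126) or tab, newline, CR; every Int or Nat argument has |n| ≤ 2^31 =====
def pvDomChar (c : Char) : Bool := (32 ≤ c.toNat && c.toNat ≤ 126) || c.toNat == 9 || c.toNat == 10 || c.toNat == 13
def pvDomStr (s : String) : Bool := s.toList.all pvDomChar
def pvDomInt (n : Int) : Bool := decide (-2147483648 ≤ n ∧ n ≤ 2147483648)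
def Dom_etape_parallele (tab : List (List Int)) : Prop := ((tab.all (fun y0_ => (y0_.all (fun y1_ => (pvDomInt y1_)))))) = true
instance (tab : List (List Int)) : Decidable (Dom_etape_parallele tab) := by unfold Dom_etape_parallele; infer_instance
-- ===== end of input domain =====

-- B replaces A's scatter (deepcopy, then in-place updates around each toppling cell) by a pure
-- gather from a toppling predicate; the equivalence proved is about the return value (A mutates
-- only its own deepcopy, so no caller-visible mutation is involved).

-- ===== PORT A =====
-- tab[i][j] (all indices used are nonnegative and in range on every admitted input)
def pvGet (g : List (List Int)) (i j : Int) : Int :=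
  PySem.List.pyGetD (PySem.List.pyGetD g i []) j 0

-- tab_res[i][j] += v (A only uses nonnegative in-range indices, where modify is exact)
def pvUpd (g : List (List Int)) (i j : Int) (v : Int) : List (List Int) :=
  g.modify i.toNat (fun row => row.modify j.toNat (fun x => x + v))

-- body of A's inner loop: the five in-place updates and cont = True
def pvStepCell (tab : List (List Int)) (st : List (List Int) × Bool) (i j : Int) :
    List (List Int) × Bool :=
  if 4 ≤ pvGet tab i j then
    (pvUpd (pvUpd (pvUpd (pvUpd (pvUpd st.1 i j (-4)) (i+1) j 1) (i-1) j 1) i (j+1) 1) i (j-1) 1,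
     true)
  else st

def etape_parallele (tab : List (List Int)) : List (List Int) × Bool :=
  (PySem.List.pyRange 1 ((tab.length : Int) - 1) 1).foldl
    (fun st i =>
      (PySem.List.pyRange 1 ((tab.length : Int) - 1) 1).foldl
        (fun st j => pvStepCell tab st i j) st)
    (tab, false)

-- ===== PORT B =====
-- B's toppling predicate t(i, j), as the 0/1 value it contributes
def pvT (tab : List (List Int)) (i j : Int) : Int :=
  if 1 ≤ i ∧ i ≤ (tab.length : Int) - 2 ∧ 1 ≤ j ∧ j ≤ (tab.length : Int) - 2 ∧ 4 ≤ pvGet tab i j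
  then 1 else 0

def etape_parallele_alt (tab : List (List Int)) : List (List Int) × Bool :=
  ((List.range tab.length).map (fun (r : Nat) =>
      (List.range (tab.getD r []).length).map (fun (c : Nat) =>
        pvGet tab (r : Int) (c : Int) - 4 * pvT tab (r : Int) (c : Int)
          + pvT tab ((r : Int) - 1) (c : Int) + pvT tab ((r : Int) + 1) (c : Int)
          + pvT tab (r : Int) ((c : Int) - 1) + pvT tab (r : Int) ((c : Int) + 1))),
   (PySem.List.pyRange 1 ((tab.length : Int) - 1) 1).any (fun i =>
      (PySem.List.pyRange 1 ((tab.length : Int) - 1) 1).any (fun j => pvT tab i j == 1)))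

-- ===== PRECONDITION & SPEC =====
-- Pre_ excludes grids with more than two rows in which some row is shorter than len(tab): there
-- A's fixed square iteration raises IndexError or returns only by data-dependent accident.
def Pre_etape_parallele (tab : List (List Int)) : Prop :=
  tab.length ≤ 2 ∨ ∀ row ∈ tab, tab.length ≤ row.length
instance (tab : List (List Int)) : Decidable (Pre_etape_parallele tab) := by
  unfold Pre_etape_parallele; infer_instance
def pvWitness_etape_parallele : List (List Int) := [[0, 0, 0], [0, 5, 0], [0, 0, 0]]

def Spec_etape_parallele (tab : List (List Int)) (out : List (List Int) × Bool) : Prop :=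
  out = etape_parallele_alt tab
instance (tab : List (List Int)) (out : List (List Int) × Bool) :
    Decidable (Spec_etape_parallele tab out) := by unfold Spec_etape_parallele; infer_instance

-- ===== CLAIM (what is proved, stated in full; the proofs are below) =====
def Claim_equal_etape_parallele : Prop := ∀ (tab : List (List Int)), Dom_etape_parallele tab →
  Pre_etape_parallele tab → Spec_etape_parallele tab (etape_parallele tab)

-- ===== LEMMAS AND PROOFS =====

-- grid-only form of A's cell step
def pvStepG (tab g : List (List Int)) (i j : Int) : List (List Int) :=
  if 4 ≤ pvGet tab i j then
    pvUpd (pvUpd (pvUpd (pvUpd (pvUpd g i j (-4)) (i+1) j 1) (i-1) j 1) i (j+1) 1) i (j-1) 1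
  else g

-- the grid entry read with Nat indices
def gD (g : List (List Int)) (r c : Nat) : Int := (g.getD r []).getD c 0

-- additive contribution of A's five scatter writes for cell (i, j), seen at output cell (r, c)
def pvTerm (tab : List (List Int)) (coef a b i j : Int) : Int :=
  if i = a ∧ j = b then (if 4 ≤ pvGet tab i j then coef else 0) else 0

def pvContrib (tab : List (List Int)) (i j r c : Int) : Int :=
  pvTerm tab (-4) r c i j + pvTerm tab 1 (r-1) c i j + pvTerm tab 1 (r+1) c i j
    + pvTerm tab 1 r (c-1) i j + pvTerm tab 1 r (c+1) i j

-- same number of rows, each row of the same length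
def pvShape (g tab : List (List Int)) : Prop :=
  g.length = tab.length ∧ ∀ r : Nat, (g.getD r []).length = (tab.getD r []).length

lemma getD_modify' {α : Type} (l : List α) (d : α) (m : Nat) (f : α → α) (c : Nat) :
    (l.modify m f).getD c d = if m = c ∧ c < l.length then f (l.getD c d) else l.getD c d := by
  rw [List.getD_eq_getElem?_getD, List.getD_eq_getElem?_getD, List.getElem?_modify]
  by_cases hc : c < l.length
  · rw [List.getElem?_eq_getElem hc]
    by_cases hm : m = c <;> simp [hm, hc]
  · rw [List.getElem?_eq_none (by omega)]
    simp [hc]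

lemma shape_upd (g tab : List (List Int)) (i j : Int) (v : Int) (h : pvShape g tab) :
    pvShape (pvUpd g i j v) tab := by
  obtain ⟨h1, h2⟩ := h
  refine ⟨by simpa [pvUpd] using h1, fun r => ?_⟩
  rw [← h2 r, pvUpd, getD_modify']
  split_ifs with hc
  · simp
  · rfl

lemma gD_upd (g : List (List Int)) (i j : Int) (v : Int) (r c : Nat) :
    gD (pvUpd g i j v) r c
      = gD g r c + (if i.toNat = r ∧ j.toNat = c ∧ c < (g.getD r []).length then v else 0) := by
  unfold gD pvUpd
  rw [getD_modify']
  by_cases hir : i.toNat = r ∧ r < g.length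
  · rw [if_pos hir, getD_modify']
    by_cases hjc : j.toNat = c ∧ c < (g.getD r []).length
    · rw [if_pos hjc, if_pos ⟨hir.1, hjc⟩]
    · rw [if_neg hjc, if_neg (by tauto)]; ring
  · rw [if_neg hir]
    rw [if_neg ?_]
    · ring
    · rintro ⟨e1, e2, hlt⟩
      apply hir
      refine ⟨e1, ?_⟩
      by_cases hr : r < g.length
      · exact hr
      · rw [List.getD_eq_default _ _ (by omega)] at hlt
        simp at hlt

lemma gD_stepG (tab g : List (List Int)) (i j : Int) (r c : Nat)
    (hsh : pvShape g tab)
    (hrow : ∀ row ∈ tab, (tab.length : Int) ≤ (row.length : Int))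
    (hi : 1 ≤ i ∧ i ≤ (tab.length : Int) - 2) (hj : 1 ≤ j ∧ j ≤ (tab.length : Int) - 2) :
    gD (pvStepG tab g i j) r c = gD g r c + pvContrib tab i j (r : Int) (c : Int) := by
  have hlen : ∀ a : Nat, (a : Int) ≤ (tab.length : Int) - 1 →
      (tab.length : Int) ≤ ((tab.getD a []).length : Int) := by
    intro a ha
    have ha' : a < tab.length := by omega
    rw [List.getD_eq_getElem _ _ ha']
    exact hrow _ (List.getElem_mem ha')
  unfold pvStepG
  by_cases h4 : 4 ≤ pvGet tab i j
  · rw [if_pos h4]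
    have s1 := shape_upd g tab i j (-4) hsh
    have s2 := shape_upd _ tab (i+1) j 1 s1
    have s3 := shape_upd _ tab (i-1) j 1 s2
    have s4 := shape_upd _ tab i (j+1) 1 s3
    rw [gD_upd, gD_upd, gD_upd, gD_upd, gD_upd, s4.2 r, s3.2 r, s2.2 r, s1.2 r, hsh.2 r]
    have e1 : (if i.toNat = r ∧ j.toNat = c ∧ c < (tab.getD r []).length then (-4:Int) else 0)
        = pvTerm tab (-4) (r:Int) (c:Int) i j := by
      simp only [pvTerm, if_pos h4]
      by_cases hc : i = (r:Int) ∧ j = (c:Int)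
      · have := hlen r (by omega)
        rw [if_pos (by omega), if_pos hc]
      · rw [if_neg (by omega), if_neg hc]
    have e2 : (if (i+1).toNat = r ∧ j.toNat = c ∧ c < (tab.getD r []).length then (1:Int) else 0)
        = pvTerm tab 1 ((r:Int)-1) (c:Int) i j := by
      simp only [pvTerm, if_pos h4]
      by_cases hc : i = (r:Int)-1 ∧ j = (c:Int)
      · have := hlen r (by omega)
        rw [if_pos (by omega), if_pos hc]
      · rw [if_neg (by omega), if_neg hc]
    have e3 : (if (i-1).toNat = r ∧ j.toNat = c ∧ c < (tab.getD r []).length then (1:Int) else 0)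
        = pvTerm tab 1 ((r:Int)+1) (c:Int) i j := by
      simp only [pvTerm, if_pos h4]
      by_cases hc : i = (r:Int)+1 ∧ j = (c:Int)
      · have := hlen r (by omega)
        rw [if_pos (by omega), if_pos hc]
      · rw [if_neg (by omega), if_neg hc]
    have e4 : (if i.toNat = r ∧ (j+1).toNat = c ∧ c < (tab.getD r []).length then (1:Int) else 0)
        = pvTerm tab 1 (r:Int) ((c:Int)-1) i j := by
      simp only [pvTerm, if_pos h4]
      by_cases hc : i = (r:Int) ∧ j = (c:Int)-1
      · have := hlen r (by omega)
        rw [if_pos (by omega), if_pos hc]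
      · rw [if_neg (by omega), if_neg hc]
    have e5 : (if i.toNat = r ∧ (j-1).toNat = c ∧ c < (tab.getD r []).length then (1:Int) else 0)
        = pvTerm tab 1 (r:Int) ((c:Int)+1) i j := by
      simp only [pvTerm, if_pos h4]
      by_cases hc : i = (r:Int) ∧ j = (c:Int)+1
      · have := hlen r (by omega)
        rw [if_pos (by omega), if_pos hc]
      · rw [if_neg (by omega), if_neg hc]
    rw [e1, e2, e3, e4, e5]
    unfold pvContrib
    ring
  · rw [if_neg h4]
    simp [pvContrib, pvTerm, h4]

lemma shape_stepG (tab g : List (List Int)) (i j : Int) (h : pvShape g tab) :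
    pvShape (pvStepG tab g i j) tab := by
  unfold pvStepG
  split_ifs with h4
  · exact shape_upd _ _ _ _ _ (shape_upd _ _ _ _ _ (shape_upd _ _ _ _ _
      (shape_upd _ _ _ _ _ (shape_upd _ _ _ _ _ h))))
  · exact h

lemma fold_row (tab : List (List Int))
    (hrow : ∀ row ∈ tab, (tab.length : Int) ≤ (row.length : Int))
    (i : Int) (hi : 1 ≤ i ∧ i ≤ (tab.length : Int) - 2) :
    ∀ (L : List Int), (∀ j ∈ L, 1 ≤ j ∧ j ≤ (tab.length : Int) - 2) →
    ∀ g, pvShape g tab →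
      pvShape (L.foldl (fun g j => pvStepG tab g i j) g) tab ∧
      ∀ r c : Nat, gD (L.foldl (fun g j => pvStepG tab g i j) g) r c
        = gD g r c + (L.map (fun j => pvContrib tab i j (r:Int) (c:Int))).sum := by
  intro L
  induction L with
  | nil => intro _ g hg; exact ⟨hg, fun r c => by simp⟩
  | cons x t ih =>
    intro hmem g hg
    have hx := hmem x (by simp)
    have step := fun (r c : Nat) => gD_stepG tab g i x r c hg hrow hi hx
    obtain ⟨sh', rest⟩ := ih (fun j hj => hmem j (by simp [hj])) (pvStepG tab g i x)
      (shape_stepG tab g i x hg)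
    refine ⟨sh', fun r c => ?_⟩
    simp only [List.foldl_cons, List.map_cons, List.sum_cons]
    rw [rest r c, step r c]
    ring

lemma fold_grid (tab : List (List Int))
    (hrow : ∀ row ∈ tab, (tab.length : Int) ≤ (row.length : Int))
    (R : List Int) (hR : ∀ j ∈ R, 1 ≤ j ∧ j ≤ (tab.length : Int) - 2) :
    ∀ (L : List Int), (∀ i ∈ L, 1 ≤ i ∧ i ≤ (tab.length : Int) - 2) →
    ∀ g, pvShape g tab →
      pvShape (L.foldl (fun g i => R.foldl (fun g j => pvStepG tab g i j) g) g) tab ∧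
      ∀ r c : Nat, gD (L.foldl (fun g i => R.foldl (fun g j => pvStepG tab g i j) g) g) r c
        = gD g r c
          + (L.map (fun i => (R.map (fun j => pvContrib tab i j (r:Int) (c:Int))).sum)).sum := by
  intro L
  induction L with
  | nil => intro _ g hg; exact ⟨hg, fun r c => by simp⟩
  | cons x t ih =>
    intro hmem g hg
    obtain ⟨sh1, row1⟩ := fold_row tab hrow x (hmem x (by simp)) R hR g hg
    obtain ⟨sh', rest⟩ := ih (fun i hi => hmem i (by simp [hi])) _ sh1
    refine ⟨sh', fun r c => ?_⟩
    simp only [List.foldl_cons, List.map_cons, List.sum_cons]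
    rw [rest r c, row1 r c]
    ring

lemma sum_single (L : List Int) (hnd : L.Nodup) (a : Int) (f : Int → Int)
    (h0 : ∀ k, k ≠ a → f k = 0) :
    (L.map f).sum = if a ∈ L then f a else 0 := by
  induction L with
  | nil => simp
  | cons x t ih =>
    simp only [List.map_cons, List.sum_cons, List.mem_cons]
    have h2 := List.nodup_cons.mp hnd
    by_cases hx : x = a
    · rw [ih h2.2, if_neg (hx ▸ h2.1), if_pos (Or.inl hx.symm), hx]
      ring
    · rw [h0 x hx, ih h2.2, zero_add]
      by_cases ha : a ∈ t
      · rw [if_pos ha, if_pos (Or.inr ha)]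
      · rw [if_neg ha, if_neg (by rintro (h | h) <;> [exact hx h.symm; exact ha h])]

lemma sumR_single (n a : Int) (f : Int → Int) (h0 : ∀ k, k ≠ a → f k = 0) :
    ((PySem.List.pyRange 1 (n-1) 1).map f).sum = if 1 ≤ a ∧ a ≤ n - 2 then f a else 0 := by
  rw [sum_single _ (PySem.List.nodup_pyRange_one ..) a f h0]
  by_cases h : 1 ≤ a ∧ a ≤ n - 2
  · rw [if_pos (PySem.List.mem_pyRange_one.mpr ⟨h.1, by omega⟩), if_pos h]
  · rw [if_neg (fun hm => h (by have := PySem.List.mem_pyRange_one.mp hm; omega)), if_neg h]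

lemma sum_term (tab : List (List Int)) (A B coef : Int) :
    ((PySem.List.pyRange 1 ((tab.length : Int)-1) 1).map (fun i =>
      ((PySem.List.pyRange 1 ((tab.length : Int)-1) 1).map
        (fun j => pvTerm tab coef A B i j)).sum)).sum = coef * pvT tab A B := by
  have hin : ∀ i ∈ PySem.List.pyRange 1 ((tab.length : Int)-1) 1,
      ((PySem.List.pyRange 1 ((tab.length : Int)-1) 1).map
        (fun j => pvTerm tab coef A B i j)).sum
      = (if 1 ≤ B ∧ B ≤ (tab.length : Int) - 2 then pvTerm tab coef A B i B else 0) := by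
    intro i _
    exact sumR_single _ B _
      (fun k hk => by simp only [pvTerm, if_neg (fun h : i = A ∧ k = B => hk h.2)])
  rw [List.map_congr_left hin]
  rw [sumR_single _ A _ (fun k hk => by
    simp only [pvTerm]
    split_ifs <;> first | rfl | (exfalso; exact hk (by tauto)))]
  unfold pvTerm pvT
  split_ifs <;> omega

lemma sum_contrib (tab : List (List Int)) (r c : Int) :
    ((PySem.List.pyRange 1 ((tab.length : Int)-1) 1).map (fun i =>
      ((PySem.List.pyRange 1 ((tab.length : Int)-1) 1).map
        (fun j => pvContrib tab i j r c)).sum)).sum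
    = -4 * pvT tab r c + pvT tab (r-1) c + pvT tab (r+1) c
        + pvT tab r (c-1) + pvT tab r (c+1) := by
  unfold pvContrib
  simp only [PySem.List.sum_map_add_int]
  rw [sum_term, sum_term, sum_term, sum_term, sum_term]
  ring

lemma stepCell_eq (tab : List (List Int)) (st : List (List Int) × Bool) (i j : Int) :
    pvStepCell tab st i j = (pvStepG tab st.1 i j, st.2 || decide (4 ≤ pvGet tab i j)) := by
  unfold pvStepCell pvStepG
  split_ifs with h <;> simp [h]

lemma anyCongr {α : Type} (l : List α) (f g : α → Bool) (h : ∀ a ∈ l, f a = g a) :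
    l.any f = l.any g := by
  induction l with
  | nil => rfl
  | cons x t ih => simp_all

lemma fold_row_pair (tab : List (List Int)) (i : Int) (L : List Int) :
    ∀ st : List (List Int) × Bool,
      L.foldl (fun st j => pvStepCell tab st i j) st
        = (L.foldl (fun g j => pvStepG tab g i j) st.1,
           st.2 || L.any (fun j => decide (4 ≤ pvGet tab i j))) := by
  induction L with
  | nil => intro st; simp
  | cons x t ih =>
    intro st
    rw [List.foldl_cons, stepCell_eq, ih]
    simp [Bool.or_assoc]

lemma fold_grid_pair (tab : List (List Int)) (R : List Int) (L : List Int) :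
    ∀ st : List (List Int) × Bool,
      L.foldl (fun st i => R.foldl (fun st j => pvStepCell tab st i j) st) st
        = (L.foldl (fun g i => R.foldl (fun g j => pvStepG tab g i j) g) st.1,
           st.2 || L.any (fun i => R.any (fun j => decide (4 ≤ pvGet tab i j)))) := by
  induction L with
  | nil => intro st; simp
  | cons x t ih =>
    intro st
    rw [List.foldl_cons, fold_row_pair, ih]
    simp [Bool.or_assoc]

lemma pvT_zero_of_small (tab : List (List Int)) (h : tab.length ≤ 2) (x y : Int) :
    pvT tab x y = 0 := by
  unfold pvT
  rw [if_neg]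
  rintro ⟨h1, h2, _⟩
  omega

lemma pvGet_natCast (tab : List (List Int)) (r c : Nat) :
    pvGet tab (r : Int) (c : Int) = gD tab r c := by
  unfold pvGet gD
  simp [PySem.List.pyGetD_natCast]

-- ===== VERDICT (by name: the statement is the Claim_ definition above) =====
theorem etape_parallele_spec : Claim_equal_etape_parallele := by
  intro tab _ hpre
  unfold Spec_etape_parallele etape_parallele etape_parallele_alt
  rw [fold_grid_pair]
  refine Prod.ext ?_ ?_
  · -- the grids
    show (PySem.List.pyRange 1 ((tab.length : Int) - 1) 1).foldl
        (fun g i => (PySem.List.pyRange 1 ((tab.length : Int) - 1) 1).foldl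
          (fun g j => pvStepG tab g i j) g) tab = _
    rcases hpre with h2 | hrowN
    · rw [PySem.List.pyRange_one_eq_nil (by omega), List.foldl_nil]
      apply List.ext_getElem
      · simp
      · intro r hr1 hr2
        apply List.ext_getElem
        · simp only [List.getElem_map, List.getElem_range, List.length_map, List.length_range]
          rw [List.getD_eq_getElem _ _ hr1]
        · intro c hc1 hc2
          simp only [List.getElem_map, List.getElem_range, pvT_zero_of_small tab h2]
          rw [pvGet_natCast]
          unfold gD
          rw [List.getD_eq_getElem _ _ hr1, List.getD_eq_getElem _ _ hc1]
          ring
    · have hrow : ∀ row ∈ tab, (tab.length : Int) ≤ (row.length : Int) :=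
        fun row hr => by exact_mod_cast hrowN row hr
      have memR : ∀ k ∈ PySem.List.pyRange 1 ((tab.length : Int) - 1) 1,
          1 ≤ k ∧ k ≤ (tab.length : Int) - 2 := by
        intro k hk
        have := PySem.List.mem_pyRange_one.mp hk
        omega
      obtain ⟨SH, F⟩ := fold_grid tab hrow _ memR _ memR tab ⟨rfl, fun r => rfl⟩
      apply List.ext_getElem
      · simp [SH.1]
      · intro r hr1 hr2
        have hlenr : ∀ g', pvShape g' tab → ∀ h : r < g'.length,
            (g'[r]'h).length = (tab.getD r []).length := fun g' hs h => by
          rw [← List.getD_eq_getElem g' [] h, hs.2 r]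
        apply List.ext_getElem
        · simp only [List.getElem_map, List.getElem_range, List.length_map, List.length_range]
          exact hlenr _ SH hr1
        · intro c hc1 hc2
          simp only [List.getElem_map, List.getElem_range]
          rw [← List.getD_eq_getElem _ 0 hc1, ← List.getD_eq_getElem _ [] hr1]
          show gD _ r c = _
          rw [F r c, sum_contrib, pvGet_natCast]
          ring
  · -- the continue flag
    simp only [Bool.false_or]
    apply anyCongr
    intro i hi
    apply anyCongr
    intro j hj
    have hi' := PySem.List.mem_pyRange_one.mp hi
    have hj' := PySem.List.mem_pyRange_one.mp hj
    unfold pvT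
    split_ifs with h
    · simp [h.2.2.2.2]
    · have h4 : ¬ 4 ≤ pvGet tab i j := fun h4 => h ⟨by omega, by omega, by omega, by omega, h4⟩
      simp [h4]
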